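-- pv_equiv track=rewrite | github.com/ICT-Division-2-ka-NERDS/24BIT094 | 9/9r.4.py | rev_list
-- ===== SOURCE A (Python) =====
-- def rev_list(l1,l2,idx):
--     if(idx!=len(l1)):
--         l2.append(l1[len(l1)-idx-1])
--         return rev_list(l1,l2,idx+1)
--     else:
--         return l2
--     '''for i in range(len(l1)):
--         l2.append(l1[len(l1)-i-1])
--     return l2'''
-- ===== SOURCE B (Python) =====
-- def rev_list(l1, l2, idx):
--     l2.extend(l1[:len(l1)-idx][::-1])
--     return l2
-- ===== Notes on version B (the rewrite author's own statement) =====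
-- stated objective: idiomatic
-- what changed: Replaces the element-by-element recursion with a single slice l1[:len(l1)-idx] reversed and extended onto l2 in one call.
import Mathlib
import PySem

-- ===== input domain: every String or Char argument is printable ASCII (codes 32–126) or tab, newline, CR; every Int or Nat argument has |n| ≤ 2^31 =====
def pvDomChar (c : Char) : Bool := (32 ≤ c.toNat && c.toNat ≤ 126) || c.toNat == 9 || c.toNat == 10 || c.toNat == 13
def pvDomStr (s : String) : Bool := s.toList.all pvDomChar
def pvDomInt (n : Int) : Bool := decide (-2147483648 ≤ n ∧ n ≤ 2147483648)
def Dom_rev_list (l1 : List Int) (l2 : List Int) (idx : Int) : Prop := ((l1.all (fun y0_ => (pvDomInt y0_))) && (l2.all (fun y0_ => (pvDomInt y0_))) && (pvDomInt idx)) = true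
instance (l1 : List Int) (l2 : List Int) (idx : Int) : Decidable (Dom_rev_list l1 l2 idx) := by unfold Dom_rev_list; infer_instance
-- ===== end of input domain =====

-- B replaces A's element-by-element recursion by one reversed-slice extend (idiomatic, no recursion);
-- both Pythons mutate l2 in place identically on Pre_, the equivalence proved is about the return value.


-- ===== PORT A =====
-- literal transliteration of A's recursion; the 'none' branch of pyGet? is Python's
-- IndexError (excluded by Pre_), where the port just returns l2
def rev_list (l1 : List Int) (l2 : List Int) (idx : Int) : List Int :=
  if idx ≠ (l1.length : Int) then
    match h : PySem.List.pyGet? l1 ((l1.length : Int) - idx - 1) with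
    | some x => rev_list l1 (l2 ++ [x]) (idx + 1)
    | none => l2
  else l2
termination_by (2 * (l1.length : Int) - idx).toNat
decreasing_by
  have hidx : -(l1.length : Int) ≤ (l1.length : Int) - idx - 1 := by
    by_contra hc
    simp only [PySem.List.pyGet?, PySem.List.pyIdx?] at h
    split_ifs at h with h1 h2 <;> simp_all <;> omega
  omega

-- ===== PORT B =====
-- Source B: l2.extend(l1[:len(l1)-idx][::-1]); return l2
def rev_list_alt (l1 : List Int) (l2 : List Int) (idx : Int) : List Int :=
  l2 ++ (PySem.List.slice l1 none (some ((l1.length : Int) - idx))).reverse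

-- ===== PRECONDITION & SPEC =====
-- Pre_ excludes idx < 0 (A raises IndexError at once) and idx > len(l1) (A recurses
-- past the terminating index forever, dying with RecursionError); A returns on the rest.
def Pre_rev_list (l1 : List Int) (l2 : List Int) (idx : Int) : Prop :=
  0 ≤ idx ∧ idx ≤ (l1.length : Int)
instance (l1 : List Int) (l2 : List Int) (idx : Int) : Decidable (Pre_rev_list l1 l2 idx) := by
  unfold Pre_rev_list; infer_instance
def pvWitness_rev_list : List Int × List Int × Int := ([1, 2, 3], [9], 1)

def Spec_rev_list (l1 : List Int) (l2 : List Int) (idx : Int) (out : List Int) : Prop := out = rev_list_alt l1 l2 idx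
instance (l1 : List Int) (l2 : List Int) (idx : Int) (out : List Int) : Decidable (Spec_rev_list l1 l2 idx out) := by unfold Spec_rev_list; infer_instance

-- ===== CLAIM (what is proved, stated in full; the proofs are below) =====
def Claim_equal_rev_list : Prop := ∀ (l1 : List Int) (l2 : List Int) (idx : Int), Dom_rev_list l1 l2 idx → Pre_rev_list l1 l2 idx → Spec_rev_list l1 l2 idx (rev_list l1 l2 idx)

-- ===== LEMMAS AND PROOFS =====

-- invariant of A's recursion: with 0 ≤ idx ≤ len, it returns l2 ++ reverse (take (len-idx) l1)
theorem rev_list_eq_append (l1 : List Int) (l2 : List Int) (idx : Int)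
    (h0 : 0 ≤ idx) (h1 : idx ≤ (l1.length : Int)) :
    rev_list l1 l2 idx = l2 ++ (l1.take ((l1.length : Int) - idx).toNat).reverse := by
  by_cases hlt : idx < (l1.length : Int)
  · rw [rev_list]
    have hne : idx ≠ (l1.length : Int) := by omega
    have hk : ((l1.length : Int) - idx - 1) = (((l1.length : Int) - idx - 1).toNat : Int) := by omega
    set k : Nat := ((l1.length : Int) - idx - 1).toNat with hkdef
    have hklt : k < l1.length := by omega
    have hget : PySem.List.pyGet? l1 ((l1.length : Int) - idx - 1) = some (l1[k]'hklt) := by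
      rw [hk]
      simp [PySem.List.pyGet?_natCast, List.getElem?_eq_getElem hklt]
    rw [if_pos hne]
    split
    case _ x hx =>
      rw [hget] at hx
      injection hx with hx
      subst hx
      rw [rev_list_eq_append l1 (l2 ++ [l1[k]'hklt]) (idx + 1) (by omega) (by omega)]
      have hsk : ((l1.length : Int) - idx).toNat = k + 1 := by omega
      have hsk' : ((l1.length : Int) - (idx + 1)).toNat = k := by omega
      have htake : List.take (k + 1) l1 = List.take k l1 ++ [l1[k]'hklt] := by
        rw [List.take_add_one, List.getElem?_eq_getElem hklt]
        simp
      rw [hsk, hsk', htake, List.reverse_append]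
      simp
    case _ hx =>
      rw [hget] at hx
      exact absurd hx (by simp)
  · have heq : idx = (l1.length : Int) := by omega
    rw [rev_list]
    simp [heq]
termination_by ((l1.length : Int) - idx).toNat
decreasing_by omega

theorem rev_list_spec' (l1 : List Int) (l2 : List Int) (idx : Int)
    (h : Pre_rev_list l1 l2 idx) : rev_list l1 l2 idx = rev_list_alt l1 l2 idx := by
  obtain ⟨h0, h1⟩ := h
  rw [rev_list_eq_append l1 l2 idx h0 h1, rev_list_alt,
    PySem.List.slice_to _ (by omega)]

-- ===== VERDICT (by name: the statement is the Claim_ definition above) =====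
theorem rev_list_spec : Claim_equal_rev_list := by
  intro l1 l2 idx _ hpre
  exact rev_list_spec' l1 l2 idx hpre
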